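-- pv_equiv track=rewrite | github.com/TadashiJei/Lunoa-Byte-Hackathon | notebooks-model/phishing_detection/model.py | contains_suspicious_terms
-- ===== SOURCE A (Python) =====
-- def contains_suspicious_terms(url):
--     """Check if URL contains suspicious terms often associated with phishing.
--
--     Args:
--         url: URL to check
--
--     Returns:
--         True if suspicious terms are found, False otherwise
--     """
--     suspicious_terms = [
--         'login', 'signin', 'account', 'verify', 'secure', 'update', 'password',
--         'bank', 'paypal', 'amazon', 'netflix', 'wallet', 'confirm', 'validation',
--         'apple', 'microsoft', 'google', 'facebook', 'instagram', 'security',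
--         'authorize', 'ebay', 'payment', 'recover', 'blockchain', 'alert', 'suspend',
--         'unusual', 'activity', 'access', 'authenticate', 'verification', 'welcome'
--     ]
--
--     url_lower = url.lower()
--     return any(term in url_lower for term in suspicious_terms)
-- ===== SOURCE B (Python) =====
-- _SUSPICIOUS_TERMS = frozenset([
--     'login', 'signin', 'account', 'verify', 'secure', 'update', 'password',
--     'bank', 'paypal', 'amazon', 'netflix', 'wallet', 'confirm', 'validation',
--     'apple', 'microsoft', 'google', 'facebook', 'instagram', 'security',
--     'authorize', 'ebay', 'payment', 'recover', 'blockchain', 'alert', 'suspend',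
--     'unusual', 'activity', 'access', 'authenticate', 'verification', 'welcome'
-- ])
--
-- _TERM_LENGTHS = sorted({len(t) for t in _SUSPICIOUS_TERMS})  # [4,5,6,7,8,9,10,12]
--
--
-- def contains_suspicious_terms(url):
--     """Check if URL contains suspicious terms often associated with phishing.
--
--     Hash-set variant: instead of one substring search per term, walk the
--     suffixes of the lowercased URL and test whether a prefix of one of the
--     possible term lengths is a member of the frozenset of terms.
--     """
--     u = url.lower()
--     while u:
--         for L in _TERM_LENGTHS:
--             if u[:L] in _SUSPICIOUS_TERMS:
--                 return True
--         u = u[1:]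
--     return False
-- ===== Notes on version B (the rewrite author's own statement) =====
-- stated objective: alternative
-- what changed: Replaced the 33 per-term substring searches by a suffix walk over the lowercased URL that hashes each prefix of a possible term length (8 distinct lengths) into a frozenset of the terms, so no per-term scanning happens at all.
import Mathlib
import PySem

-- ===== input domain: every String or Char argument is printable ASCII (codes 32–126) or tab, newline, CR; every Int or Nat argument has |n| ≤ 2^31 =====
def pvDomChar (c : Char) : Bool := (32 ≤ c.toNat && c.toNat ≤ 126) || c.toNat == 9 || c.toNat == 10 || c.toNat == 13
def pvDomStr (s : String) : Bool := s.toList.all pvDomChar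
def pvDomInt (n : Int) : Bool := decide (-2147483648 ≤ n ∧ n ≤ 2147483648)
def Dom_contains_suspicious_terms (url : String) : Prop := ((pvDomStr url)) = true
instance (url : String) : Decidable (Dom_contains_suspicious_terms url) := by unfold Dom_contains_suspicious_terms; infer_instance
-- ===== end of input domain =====

-- B replaces A's 33 per-term substring searches by a walk over the suffixes of the
-- lowercased URL that looks up each prefix of a possible term length in a set of
-- the terms (alternative algorithm, not claimed faster).

-- ===== PORT A =====
def pvSuspiciousTermsA : List String := [
  "login", "signin", "account", "verify", "secure", "update", "password",
  "bank", "paypal", "amazon", "netflix", "wallet", "confirm", "validation",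
  "apple", "microsoft", "google", "facebook", "instagram", "security",
  "authorize", "ebay", "payment", "recover", "blockchain", "alert", "suspend",
  "unusual", "activity", "access", "authenticate", "verification", "welcome"]

def contains_suspicious_terms (url : String) : Bool :=
  let url_lower := PySem.Str.lower url
  pvSuspiciousTermsA.any (fun term => PySem.Str.isIn term url_lower)

-- ===== PORT B =====
-- _SUSPICIOUS_TERMS = frozenset([...]) of Source B (a set of character lists)
def pvTermSet : PySem.Set (List Char) := PySem.Set.ofList [
  "login".toList, "signin".toList, "account".toList, "verify".toList, "secure".toList,
  "update".toList, "password".toList, "bank".toList, "paypal".toList, "amazon".toList,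
  "netflix".toList, "wallet".toList, "confirm".toList, "validation".toList, "apple".toList,
  "microsoft".toList, "google".toList, "facebook".toList, "instagram".toList, "security".toList,
  "authorize".toList, "ebay".toList, "payment".toList, "recover".toList, "blockchain".toList,
  "alert".toList, "suspend".toList, "unusual".toList, "activity".toList, "access".toList,
  "authenticate".toList, "verification".toList, "welcome".toList]

-- _TERM_LENGTHS = sorted({len(t) for t in _SUSPICIOUS_TERMS}); evaluates to this literal
def pvTermLengths : List Nat := [4, 5, 6, 7, 8, 9, 10, 12]

-- the while-loop of Source B: 'while u: check prefixes; u = u[1:]' as structural recursion;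
-- u[:L] for the literal nonnegative L above is List.take L, u[1:] is .tail (= the cons tail)
def pvSuffixWalk : List Char → Bool
  | [] => false
  | c :: rest =>
      if pvTermLengths.any (fun L => pvTermSet.contains ((c :: rest).take L)) then true
      else pvSuffixWalk rest

def contains_suspicious_terms_alt (url : String) : Bool :=
  pvSuffixWalk (PySem.Str.lower url).toList

-- ===== PRECONDITION & SPEC =====
def Spec_contains_suspicious_terms (url : String) (out : Bool) : Prop := out = contains_suspicious_terms_alt url
instance (url : String) (out : Bool) : Decidable (Spec_contains_suspicious_terms url out) := by unfold Spec_contains_suspicious_terms; infer_instance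

-- ===== CLAIM (what is proved, stated in full; the proofs are below) =====
def Claim_equal_contains_suspicious_terms : Prop := ∀ (url : String), Dom_contains_suspicious_terms url → Spec_contains_suspicious_terms url (contains_suspicious_terms url)

-- ===== LEMMAS AND PROOFS =====

-- the suffix walk fires exactly when some suffix has a prefix in the term set
theorem pvSuffixWalk_iff (s : List Char) :
    pvSuffixWalk s = true ↔
      ∃ j, pvTermLengths.any (fun L => pvTermSet.contains ((s.drop j).take L)) = true := by
  induction s with
  | nil =>
    simp only [pvSuffixWalk, List.drop_nil, List.take_nil]
    constructor
    · intro h; cases h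
    · rintro ⟨j, hj⟩
      exfalso
      have : pvTermLengths.any (fun L => pvTermSet.contains ([] : List Char)) = false := by decide
      simp only [List.any_eq_true] at hj
      obtain ⟨L, _, hc⟩ := hj
      revert hc; decide
  | cons c rest ih =>
    simp only [pvSuffixWalk]
    split_ifs with h
    · constructor
      · intro _; exact ⟨0, by simpa using h⟩
      · intro _; rfl
    · rw [ih]
      constructor
      · rintro ⟨j, hj⟩; exact ⟨j + 1, by simpa using hj⟩
      · rintro ⟨j, hj⟩
        cases j with
        | zero => exact absurd (by simpa using hj) h
        | succ j => exact ⟨j, by simpa using hj⟩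

-- the deduplicating set constructor leaves the (distinct) terms as given:
-- the B-side set is exactly the A-side list mapped to char lists
theorem pvTermSet_eq : pvTermSet = pvSuspiciousTermsA.map String.toList := by decide

-- membership in the B-side term set is membership in the A-side term list (as char lists)
theorem pvTermSet_contains_iff (x : List Char) :
    pvTermSet.contains x = true ↔ ∃ t ∈ pvSuspiciousTermsA, t.toList = x := by
  simp [PySem.Set.contains, pvTermSet_eq, List.mem_map, eq_comm]

-- every term's length is one of the possible lengths
theorem pvTermLength_mem : ∀ t ∈ pvSuspiciousTermsA, t.toList.length ∈ pvTermLengths := by decide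

-- ===== VERDICT (by name: the statement is the Claim_ definition above) =====
theorem contains_suspicious_terms_spec : Claim_equal_contains_suspicious_terms := by
  intro url _
  unfold Spec_contains_suspicious_terms contains_suspicious_terms contains_suspicious_terms_alt
  set s := (PySem.Str.lower url).toList with hs
  rw [Bool.eq_iff_iff, pvSuffixWalk_iff]
  simp only [List.any_eq_true, PySem.Str.isIn_eq, ← hs]
  constructor
  · -- A finds a term as substring → the walk finds it
    rintro ⟨t, ht, hin⟩
    obtain ⟨j, hpre⟩ := (PySem.Chars.exists_prefix_drop_iff_isIn (sub := t.toList) (s := s)).mpr hin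
    refine ⟨j, t.toList.length, pvTermLength_mem t ht, ?_⟩
    rw [(List.prefix_iff_eq_take.mp hpre).symm]
    exact (pvTermSet_contains_iff t.toList).mpr ⟨t, ht, rfl⟩
  · -- the walk finds a prefix in the set → that term is a substring
    rintro ⟨j, L, _, hc⟩
    obtain ⟨t, ht, htx⟩ := (pvTermSet_contains_iff _).mp hc
    refine ⟨t, ht, ?_⟩
    apply (PySem.Chars.exists_prefix_drop_iff_isIn (sub := t.toList) (s := s)).mp
    exact ⟨j, htx ▸ List.take_prefix L (s.drop j)⟩
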